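-- pv_equiv track=rewrite | github.com/samdivaio/Giesela | musicbot/utils.py | to_timestamp
-- ===== SOURCE A (Python) =====
-- def to_timestamp(seconds):
--     sec = int(seconds)
--     s = "{0:0>2}".format(sec % 60)
--     m = (sec // 60) % 60
--     h = (sec // 60 // 60) % 24
--     d = (sec // 60 // 60 // 24)
--
--     work_string = ""
--     if d > 0:
--         return ":".join(str(x) for x in (d, h, m, s))
--     elif h > 0:
--         return ":".join(str(x) for x in (h, m, s))
--     else:
--         return ":".join(str(x) for x in (m, s))
-- ===== SOURCE B (Python) =====
-- def _units(v, divs):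
--     """Recursively split v over divisors (smallest first), dropping leading
--     non-positive units; returns unit strings largest-first."""
--     if not divs:
--         return [str(v)] if v > 0 else []
--     q, r = divmod(v, divs[0])
--     out = _units(q, divs[1:])
--     if out or r > 0:
--         out.append(str(r))
--     return out
--
--
-- def to_timestamp(seconds):
--     sec = int(seconds)
--     minutes, s = divmod(sec, 60)
--     head = _units(minutes, [60, 24]) or ["0"]
--     head.append("{0:0>2}".format(s))
--     return ":".join(head)
-- ===== Notes on version B (the rewrite author's own statement) =====
-- stated objective: alternative
-- what changed: Replaces A's flat compute-all-then-branch if/elif chain by a recursive helper that splits the value over a divisor list ([60,24]) with divmod, dropping leading non-positive units as the recursion unwinds, then appends the always-present minutes/padded seconds.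
import Mathlib
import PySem

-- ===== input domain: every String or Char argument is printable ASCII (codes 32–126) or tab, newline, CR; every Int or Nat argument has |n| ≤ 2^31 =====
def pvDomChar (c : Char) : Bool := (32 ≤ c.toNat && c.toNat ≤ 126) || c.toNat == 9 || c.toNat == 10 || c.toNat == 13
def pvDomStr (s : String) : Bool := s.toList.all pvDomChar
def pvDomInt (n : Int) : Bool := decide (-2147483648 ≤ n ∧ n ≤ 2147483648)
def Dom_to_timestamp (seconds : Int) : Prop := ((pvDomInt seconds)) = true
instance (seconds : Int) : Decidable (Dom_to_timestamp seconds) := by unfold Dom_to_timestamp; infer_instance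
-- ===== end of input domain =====

-- B replaces A's compute-all-then-branch chain by a recursive divisor-list split; objective: alternative decomposition, same cost.

-- "{0:0>2}".format(v): left-pad with '0' to width 2; exact for any int v (here only applied to 0 ≤ v < 60)
def pad2 (v : Int) : String :=
  let t := PySem.Int.toChars v
  String.ofList (if t.length < 2 then '0' :: t else t)

-- ===== PORT A =====
def to_timestamp (seconds : Int) : String :=
  let sec := seconds
  let s := pad2 (PySem.Int.mod sec 60)
  let m := PySem.Int.mod (PySem.Int.floordiv sec 60) 60
  let h := PySem.Int.mod (PySem.Int.floordiv (PySem.Int.floordiv sec 60) 60) 24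
  let d := PySem.Int.floordiv (PySem.Int.floordiv (PySem.Int.floordiv sec 60) 60) 24
  if d > 0 then
    PySem.Str.join ":" [PySem.Int.toStr d, PySem.Int.toStr h, PySem.Int.toStr m, s]
  else if h > 0 then
    PySem.Str.join ":" [PySem.Int.toStr h, PySem.Int.toStr m, s]
  else
    PySem.Str.join ":" [PySem.Int.toStr m, s]

-- ===== PORT B =====
-- _units(v, divs): recursion over the divisor list; drops leading non-positive units
def unitsRec (v : Int) (divs : List Int) : List String :=
  match divs with
  | [] => if v > 0 then [PySem.Int.toStr v] else []
  | dv :: rest =>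
      let q := PySem.Int.floordiv v dv
      let r := PySem.Int.mod v dv
      let out := unitsRec q rest
      if out ≠ [] ∨ r > 0 then out ++ [PySem.Int.toStr r] else out

def to_timestamp_alt (seconds : Int) : String :=
  let sec := seconds
  let minutes := PySem.Int.floordiv sec 60
  let s := PySem.Int.mod sec 60
  let u := unitsRec minutes [60, 24]
  let head := if u = [] then [PySem.Int.toStr 0] else u   -- '… or ["0"]'
  PySem.Str.join ":" (head ++ [pad2 s])

-- ===== PRECONDITION & SPEC =====
def Spec_to_timestamp (seconds : Int) (out : String) : Prop := out = to_timestamp_alt seconds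
instance (seconds : Int) (out : String) : Decidable (Spec_to_timestamp seconds out) := by unfold Spec_to_timestamp; infer_instance

-- ===== CLAIM (what is proved, stated in full; the proofs are below) =====
def Claim_equal_to_timestamp : Prop := ∀ (seconds : Int), Dom_to_timestamp seconds → Spec_to_timestamp seconds (to_timestamp seconds)

-- ===== LEMMAS AND PROOFS =====

theorem to_timestamp_spec : Claim_equal_to_timestamp := by
  intro sec _
  unfold Spec_to_timestamp to_timestamp to_timestamp_alt
  simp only [unitsRec,
    PySem.Int.floordiv_eq_ediv_of_pos (by norm_num : (0:Int) < 60),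
    PySem.Int.floordiv_eq_ediv_of_pos (by norm_num : (0:Int) < 24),
    PySem.Int.mod_eq_emod_of_pos (by norm_num : (0:Int) < 60),
    PySem.Int.mod_eq_emod_of_pos (by norm_num : (0:Int) < 24)]
  by_cases hd : 0 < sec / 60 / 60 / 24
  · simp [hd, PySem.Str.join]
  · by_cases hh : 0 < sec / 60 / 60 % 24
    · simp [hd, hh, PySem.Str.join]
    · by_cases hm : 0 < sec / 60 % 60
      · simp [hd, hh, hm, PySem.Str.join]
      · have hm0 : sec / 60 % 60 = 0 := by omega
        simp [hd, hh, hm0, PySem.Str.join]
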